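-- pv_equiv track=rewrite | github.com/mjendrusch/salad | scripts/motif_success.py | get_consubsets
-- ===== SOURCE A (Python) =====
-- def get_consubsets(motif_groups, segments):
--     consubsets = {m: "" for m in motif_groups}
--     total_aa = 0
--     for (start, end), motif_group in segments:
--         segval = (end - start + 1) * "F"
--         for m in motif_groups:
--             if m == motif_group:
--                 total_aa += len(segval)
--                 consubsets[m] += segval
--                 for mm in motif_groups:
--                     if mm != m:
--                         consubsets[mm] += "X" * len(segval)
--     return consubsets
-- ===== SOURCE B (Python) =====
-- def get_consubsets(motif_groups, segments):
--     known = set(motif_groups)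
--     return {m: "".join(("F" if mg == m else "X") * (end - start + 1)
--                        for (start, end), mg in segments
--                        if mg in known)
--             for m in motif_groups}
-- ===== Notes on version B (the rewrite author's own statement) =====
-- stated objective: simpler
-- what changed: B builds the result group-major with a dict comprehension joining one run per segment, instead of A's segment-major triple-nested loop that searches for the matching group and then sweeps all groups again to append X runs; the dead total_aa accumulator is dropped.
-- outside the precondition, e.g. on get_consubsets(['', ''], [((0, 0), ''), ((0, 0), '')]): A returns {'': 'FFFF'}, B returns {'': 'FF'}
import Mathlib
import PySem

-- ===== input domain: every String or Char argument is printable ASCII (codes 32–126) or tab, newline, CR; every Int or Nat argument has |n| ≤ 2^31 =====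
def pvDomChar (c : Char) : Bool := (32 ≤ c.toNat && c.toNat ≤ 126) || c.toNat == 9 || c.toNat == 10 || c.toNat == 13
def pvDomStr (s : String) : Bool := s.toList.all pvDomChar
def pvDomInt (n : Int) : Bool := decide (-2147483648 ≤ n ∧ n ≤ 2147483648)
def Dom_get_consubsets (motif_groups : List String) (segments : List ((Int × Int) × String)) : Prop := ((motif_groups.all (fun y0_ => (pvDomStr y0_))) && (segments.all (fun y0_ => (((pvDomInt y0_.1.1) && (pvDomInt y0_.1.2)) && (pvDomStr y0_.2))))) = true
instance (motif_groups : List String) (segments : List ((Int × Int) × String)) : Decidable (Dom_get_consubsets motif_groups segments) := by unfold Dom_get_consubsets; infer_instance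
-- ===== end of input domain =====

-- B rebuilds the result group-major with one join per group instead of A's segment-major
-- triple-nested loop (and drops A's dead total_aa accumulator); equal output proved on Pre_.

-- Python's  s * n  for a one-char string s (empty when n ≤ 0) — exact
def pvStrMul (c : Char) (n : Int) : String := String.ofList (List.replicate n.toNat c)

-- ===== PORT A =====
-- inner  'for mm in motif_groups: if mm != m: consubsets[mm] += "X" * len(segval)'
def pvAInner (motif_groups : List String) (m : String) (segval : String)
    (d : PySem.Dict String String) : PySem.Dict String String :=
  motif_groups.foldl (fun d mm =>
    if mm != m then d.insert mm (d.getD mm "" ++ pvStrMul 'X' (PySem.Str.len segval)) else d) d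

-- middle  'for m in motif_groups: if m == motif_group: …'
def pvAMiddle (motif_groups : List String) (motif_group : String) (segval : String)
    (st : PySem.Dict String String × Int) : PySem.Dict String String × Int :=
  motif_groups.foldl (fun st m =>
    if m == motif_group then
      let total_aa := st.2 + PySem.Str.len segval
      let d := st.1.insert m (st.1.getD m "" ++ segval)
      (pvAInner motif_groups m segval d, total_aa)
    else st) st

def get_consubsets (motif_groups : List String) (segments : List ((Int × Int) × String)) : List (String × String) :=
  let consubsets : PySem.Dict String String :=
    motif_groups.foldl (fun d m => d.insert m "") PySem.Dict.empty
  (segments.foldl (fun st seg =>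
      pvAMiddle motif_groups seg.2 (pvStrMul 'F' (seg.1.2 - seg.1.1 + 1)) st)
    (consubsets, (0 : Int))).1.items

-- ===== PORT B =====
def get_consubsets_alt (motif_groups : List String) (segments : List ((Int × Int) × String)) : List (String × String) :=
  let known : PySem.Set String := PySem.Set.ofList motif_groups
  (motif_groups.foldl (fun d m =>
      d.insert m (PySem.Str.join "" (segments.filterMap (fun seg =>
        if PySem.Set.contains known seg.2 then
          some (pvStrMul (if seg.2 == m then 'F' else 'X') (seg.1.2 - seg.1.1 + 1))
        else none))))
    PySem.Dict.empty).items

-- ===== PRECONDITION & SPEC =====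
-- Pre_ excludes duplicated names in motif_groups, on which A's repeated appending
-- (once per duplicate occurrence) is an accident of iterating the key list twice.
def Pre_get_consubsets (motif_groups : List String) (segments : List ((Int × Int) × String)) : Prop :=
  motif_groups.Nodup
instance (motif_groups : List String) (segments : List ((Int × Int) × String)) : Decidable (Pre_get_consubsets motif_groups segments) := by unfold Pre_get_consubsets; infer_instance

def pvWitness_get_consubsets : List String × (List ((Int × Int) × String)) :=
  (["a", "b"], [((0, 2), "a"), ((3, 3), "b"), ((4, 5), "z")])

def Spec_get_consubsets (motif_groups : List String) (segments : List ((Int × Int) × String)) (out : List (String × String)) : Prop := out = get_consubsets_alt motif_groups segments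
instance (motif_groups : List String) (segments : List ((Int × Int) × String)) (out : List (String × String)) : Decidable (Spec_get_consubsets motif_groups segments out) := by unfold Spec_get_consubsets; infer_instance

-- ===== CLAIM (what is proved, stated in full; the proofs are below) =====
def Claim_equal_get_consubsets : Prop := ∀ (motif_groups : List String) (segments : List ((Int × Int) × String)), Dom_get_consubsets motif_groups segments → Pre_get_consubsets motif_groups segments → Spec_get_consubsets motif_groups segments (get_consubsets motif_groups segments)

-- ===== LEMMAS AND PROOFS =====

-- the run a single segment contributes to group m (after normalising the X-run length)
def contA (mgs : List String) (m : String) (seg : (Int × Int) × String) : String :=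
  if mgs.contains seg.2 then pvStrMul (if seg.2 == m then 'F' else 'X') (seg.1.2 - seg.1.1 + 1) else ""

theorem pvStrMul_len (c c' : Char) (n : Int) :
    pvStrMul c (PySem.Str.len (pvStrMul c' n)) = pvStrMul c n := by
  simp only [pvStrMul]
  congr 1
  simp
  omega

theorem keys_mkmap (mgs : List String) (g : String → String) :
    (PySem.Dict.mk (mgs.map fun m => (m, g m))).keys = mgs := by
  simp [PySem.Dict.keys, Function.comp_def]

theorem getD_mkmap (mgs : List String) (hnd : mgs.Nodup) (g : String → String)
    (k : String) (hk : k ∈ mgs) (d0 : String) :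
    (PySem.Dict.mk (mgs.map fun m => (m, g m))).getD k d0 = g k := by
  have hmem : (k, g k) ∈ mgs.map (fun m => (m, g m)) :=
    List.mem_map_of_mem (f := fun m => (m, g m)) hk
  exact PySem.Dict.getD_of_mem_items _ hmem (by rw [keys_mkmap]; exact hnd) d0

theorem insert_mkmap (mgs : List String) (g : String → String)
    (k : String) (hk : k ∈ mgs) (v : String) :
    (PySem.Dict.mk (mgs.map fun m => (m, g m))).insert k v
      = PySem.Dict.mk (mgs.map fun m => (m, if m = k then v else g m)) := by
  have hc : (PySem.Dict.mk (mgs.map fun m => (m, g m))).contains k = true := by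
    rw [PySem.Dict.contains_iff_mem_keys, keys_mkmap]; exact hk
  apply PySem.Dict.ext
  rw [PySem.Dict.items_insert_of_contains _ v hc]
  show (mgs.map fun m => (m, g m)).map _ = _
  rw [List.map_map]
  refine List.map_congr_left (fun m _ => ?_)
  by_cases h : m = k <;> simp [h]

theorem inner_loop (mgs : List String) (hnd : mgs.Nodup) (x mt : String) :
    ∀ (l : List String), l.Nodup → (∀ a ∈ l, a ∈ mgs) → ∀ g : String → String,
    l.foldl (fun d mm => if mm != mt then d.insert mm (d.getD mm "" ++ x) else d)
      (PySem.Dict.mk (mgs.map fun m => (m, g m)))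
    = PySem.Dict.mk (mgs.map fun m => (m, if m ∈ l ∧ m ≠ mt then g m ++ x else g m)) := by
  intro l
  induction l with
  | nil => intro _ _ g; simp
  | cons a l ih =>
    intro hln hsub g
    rw [List.foldl_cons]
    by_cases ha : a = mt
    · rw [if_neg (by simp [ha])]
      rw [ih hln.of_cons (fun b hb => hsub b (List.mem_cons_of_mem a hb)) g]
      refine congrArg _ (List.map_congr_left fun m _ => ?_)
      by_cases hm : m = mt
      · simp [hm]
      · by_cases hml : m ∈ l <;> simp [hm, hml, List.mem_cons, ha]
    · have hne : (a != mt) = true := by simp [ha]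
      rw [if_pos hne,
        getD_mkmap mgs hnd g a (hsub a List.mem_cons_self) "",
        insert_mkmap mgs g a (hsub a List.mem_cons_self) (g a ++ x),
        ih hln.of_cons (fun b hb => hsub b (List.mem_cons_of_mem a hb)) _]
      have hal : a ∉ l := (List.nodup_cons.mp hln).1
      refine congrArg _ (List.map_congr_left fun m _ => ?_)
      by_cases hm : m = a
      · subst hm
        simp [hal, ha]
      · by_cases hmt : m = mt
        · have hmta : ¬ (mt = a) := fun h => hm (by rw [hmt]; exact h)
          by_cases hml : m ∈ l <;> simp [hmt, List.mem_cons, hmta]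
        · by_cases hml : m ∈ l <;> simp [hm, hml, hmt, List.mem_cons]

theorem middle_loop (mgs : List String) (hnd : mgs.Nodup) (mg : String) (segval : String) :
    ∀ (l : List String), l.Nodup → (∀ a ∈ l, a ∈ mgs) → ∀ (g : String → String) (t : Int),
    ∃ t' : Int,
    l.foldl (fun st m =>
        if m == mg then
          let total_aa := st.2 + PySem.Str.len segval
          let d := st.1.insert m (st.1.getD m "" ++ segval)
          (pvAInner mgs m segval d, total_aa)
        else st)
      (PySem.Dict.mk (mgs.map fun m => (m, g m)), t)
    = (PySem.Dict.mk (mgs.map fun m => (m,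
        if mg ∈ l then (if m = mg then g m ++ segval else g m ++ pvStrMul 'X' (PySem.Str.len segval)) else g m)), t') := by
  intro l
  induction l with
  | nil => intro _ _ g t; exact ⟨t, by simp⟩
  | cons a l ih =>
    intro hln hsub g t
    rw [List.foldl_cons]
    by_cases ha : a = mg
    · subst ha
      rw [if_pos (by simp)]
      simp only
      rw [getD_mkmap mgs hnd g a (hsub a List.mem_cons_self) "",
        insert_mkmap mgs g a (hsub a List.mem_cons_self) (g a ++ segval)]
      rw [pvAInner,
        inner_loop mgs hnd (pvStrMul 'X' (PySem.Str.len segval)) a mgs hnd (fun _ h => h) _]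
      have hal : a ∉ l := (List.nodup_cons.mp hln).1
      obtain ⟨t', h⟩ := ih hln.of_cons (fun b hb => hsub b (List.mem_cons_of_mem a hb)) _ (t + PySem.Str.len segval)
      rw [h]
      refine ⟨t', ?_⟩
      refine congrArg (fun l' => (PySem.Dict.mk l', t')) (List.map_congr_left fun m hm => ?_)
      by_cases hma : m = a
      · subst hma; simp [hal]
      · simp [hma, hm, hal, List.mem_cons]
    · rw [if_neg (by simp [ha])]
      obtain ⟨t', h⟩ := ih hln.of_cons (fun b hb => hsub b (List.mem_cons_of_mem a hb)) g t
      rw [h]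
      refine ⟨t', ?_⟩
      refine congrArg (fun l' => (PySem.Dict.mk l', t')) (List.map_congr_left fun m hm => ?_)
      simp [List.mem_cons, Ne.symm ha]

theorem outer_loop (mgs : List String) (hnd : mgs.Nodup) :
    ∀ (segs : List ((Int × Int) × String)) (g : String → String) (t : Int),
    (segs.foldl (fun st seg =>
        pvAMiddle mgs seg.2 (pvStrMul 'F' (seg.1.2 - seg.1.1 + 1)) st)
      (PySem.Dict.mk (mgs.map fun m => (m, g m)), t)).1
    = PySem.Dict.mk (mgs.map fun m => (m, segs.foldl (fun a seg => a ++ contA mgs m seg) (g m))) := by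
  intro segs
  induction segs with
  | nil => intro g t; simp
  | cons seg rest ih =>
    intro g t
    rw [List.foldl_cons, pvAMiddle]
    obtain ⟨t', h⟩ := middle_loop mgs hnd seg.2 (pvStrMul 'F' (seg.1.2 - seg.1.1 + 1)) mgs hnd (fun _ h => h) g t
    rw [h, ih _ t']
    refine congrArg _ (List.map_congr_left fun m hm => ?_)
    simp only [List.foldl_cons]
    have hinit : (if seg.2 ∈ mgs then
          (if m = seg.2 then g m ++ pvStrMul 'F' (seg.1.2 - seg.1.1 + 1)
           else g m ++ pvStrMul 'X' (PySem.Str.len (pvStrMul 'F' (seg.1.2 - seg.1.1 + 1))))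
        else g m) = g m ++ contA mgs m seg := by
      by_cases hc : seg.2 ∈ mgs
      · rw [if_pos hc]
        by_cases hms : m = seg.2
        · rw [if_pos hms]
          simp [contA, hms, hc]
        · rw [if_neg hms, pvStrMul_len]
          have hsm : ¬ seg.2 = m := fun h => hms h.symm
          simp [contA, hc, hsm]
      · rw [if_neg hc]
        simp [contA, hc]
    rw [hinit]

theorem init_dict (mgs : List String) (hnd : mgs.Nodup) :
    mgs.foldl (fun d m => d.insert m "") PySem.Dict.empty
      = PySem.Dict.mk (mgs.map fun m => (m, "")) := by
  apply PySem.Dict.ext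
  have h := PySem.Dict.items_foldl_insert_fresh (l := mgs) (k := fun m => m)
    (v := fun _ => ("" : String)) (d := PySem.Dict.empty)
    (by intro a _; exact PySem.Dict.contains_empty a) (by simpa using hnd)
  simpa using h

theorem A_char (mgs : List String) (hnd : mgs.Nodup) (segs : List ((Int × Int) × String)) :
    get_consubsets mgs segs
      = mgs.map (fun m => (m, segs.foldl (fun a seg => a ++ contA mgs m seg) "")) := by
  unfold get_consubsets
  rw [init_dict mgs hnd]
  show (segs.foldl _ (PySem.Dict.mk (mgs.map fun m => (m, "")), (0 : Int))).1.items = _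
  rw [outer_loop mgs hnd segs (fun _ => "") 0]

theorem B_char (mgs : List String) (hnd : mgs.Nodup) (segs : List ((Int × Int) × String)) :
    get_consubsets_alt mgs segs
      = mgs.map (fun m => (m, PySem.Str.join "" (segs.filterMap (fun seg =>
          if PySem.Set.contains (PySem.Set.ofList mgs) seg.2 then
            some (pvStrMul (if seg.2 == m then 'F' else 'X') (seg.1.2 - seg.1.1 + 1))
          else none)))) := by
  unfold get_consubsets_alt
  have h := PySem.Dict.items_foldl_insert_fresh (l := mgs) (k := fun m => m)
    (v := fun m => PySem.Str.join "" (segs.filterMap (fun seg =>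
      if PySem.Set.contains (PySem.Set.ofList mgs) seg.2 then
        some (pvStrMul (if seg.2 == m then 'F' else 'X') (seg.1.2 - seg.1.1 + 1))
      else none))) (d := PySem.Dict.empty)
    (by intro a _; exact PySem.Dict.contains_empty a) (by simpa using hnd)
  simpa using h

theorem intercalate_nil_flatten (xs : List (List Char)) : [].intercalate xs = xs.flatten := by
  induction xs with
  | nil => rfl
  | cons x xs ih => cases xs <;> simp_all [List.intercalate]

theorem strjoin_nil : PySem.Str.join "" [] = "" := by rfl

theorem strjoin_cons (x : String) (xs : List String) :
    PySem.Str.join "" (x :: xs) = x ++ PySem.Str.join "" xs := by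
  apply String.toList_inj.mp
  simp [PySem.Str.join, PySem.Chars.join, intercalate_nil_flatten]

theorem val_eq (mgs : List String) (m : String) :
    ∀ (segs : List ((Int × Int) × String)) (init : String),
    segs.foldl (fun a seg => a ++ contA mgs m seg) init
    = init ++ PySem.Str.join "" (segs.filterMap (fun seg =>
        if PySem.Set.contains (PySem.Set.ofList mgs) seg.2 then
          some (pvStrMul (if seg.2 == m then 'F' else 'X') (seg.1.2 - seg.1.1 + 1))
        else none)) := by
  intro segs
  induction segs with
  | nil => intro init; simp [strjoin_nil]
  | cons seg rest ih =>
    intro init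
    rw [List.foldl_cons, List.filterMap_cons]
    by_cases hc : PySem.Set.contains (PySem.Set.ofList mgs) seg.2
    · have hmem : seg.2 ∈ mgs := by
        have := (PySem.Set.contains_iff _ _).mp hc
        simpa [PySem.Set.mem_ofList] using this
      rw [if_pos hc]
      rw [ih, strjoin_cons, ← String.append_assoc]
      congr 2
      simp [contA, hmem]
    · have hmem : seg.2 ∉ mgs := by
        intro hmem
        exact hc ((PySem.Set.contains_iff _ _).mpr ((PySem.Set.mem_ofList _ _).mpr hmem))
      rw [if_neg hc, ih]
      have hz : contA mgs m seg = "" := by simp [contA, hmem]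
      simp [hz]

-- ===== VERDICT (by name: the statement is the Claim_ definition above) =====
theorem get_consubsets_spec : Claim_equal_get_consubsets := by
  intro mgs segs _ hpre
  unfold Spec_get_consubsets
  rw [A_char mgs hpre segs, B_char mgs hpre segs]
  refine List.map_congr_left fun m _ => ?_
  rw [val_eq mgs m segs ""]
  simp
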